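-- pv_equiv track=rewrite | github.com/nulltogeek/LL1Parser | main.py | reverse_rule
-- ===== SOURCE A (Python) =====
-- def reverse_rule(rule_arr):
--     """a method for reversing rule that came from a stack"""
--
--     # 1.reverse the rule array
--     reverse_arr_rule = rule_arr[::-1]
--
--     # an array to holds the each element of the revered array
--     reverse_list = []
--
--     # loopthrogh the reversed arr to add each element to a list
--     # we done this because of ' sign it must include with its alphabet
--     for char in reverse_arr_rule:
--         # check > sign to break because we want the second part of the rule(first part of the revered rule)
--         if char == ">":
--             break
--         else:
--             reverse_list.append(char)
--
--     return reverse_list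
-- ===== SOURCE B (Python) =====
-- def reverse_rule(rule_arr):
--     """Locate the last '>' and return the tail after it, reversed (whole list reversed if none)."""
--     p = -1
--     for i, x in enumerate(rule_arr):
--         if x == ">":
--             p = i
--     return rule_arr[p + 1:][::-1]
-- ===== Notes on version B (the rewrite author's own statement) =====
-- stated objective: simpler
-- what changed: Replaces the reverse-then-collect-until-break loop with computing the index of the last '>' and returning one slice of the original list, reversed.
import Mathlib
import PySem

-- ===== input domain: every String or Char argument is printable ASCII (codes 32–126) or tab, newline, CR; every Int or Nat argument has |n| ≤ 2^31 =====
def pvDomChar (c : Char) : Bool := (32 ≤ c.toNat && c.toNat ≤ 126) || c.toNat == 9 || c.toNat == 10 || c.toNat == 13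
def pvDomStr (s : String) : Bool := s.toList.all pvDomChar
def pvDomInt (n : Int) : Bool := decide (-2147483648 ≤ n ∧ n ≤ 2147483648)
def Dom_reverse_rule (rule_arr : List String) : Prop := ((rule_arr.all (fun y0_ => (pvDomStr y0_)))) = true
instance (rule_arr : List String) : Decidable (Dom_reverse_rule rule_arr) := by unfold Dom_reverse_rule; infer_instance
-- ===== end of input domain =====

-- B replaces A's reverse-then-collect-until-'>'-break loop by one forward pass
-- finding the last '>' index, then a single slice-and-reverse (objective: simpler).

-- ===== PORT A =====
-- the 'for char in reverse_arr_rule' loop with its break, accumulating reverse_list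
def reverseRuleLoop : List String → List String → List String
  | [], acc => acc
  | c :: rest, acc => if c = ">" then acc else reverseRuleLoop rest (acc ++ [c])

def reverse_rule (rule_arr : List String) : List String :=
  reverseRuleLoop rule_arr.reverse []

-- ===== PORT B =====
def reverse_rule_alt (rule_arr : List String) : List String :=
  let p : Int := (PySem.List.enumerate rule_arr 0).foldl
    (fun p ix => if ix.2 = ">" then ix.1 else p) (-1)
  (PySem.List.slice rule_arr (some (p + 1)) none).reverse

-- ===== PRECONDITION & SPEC =====
def Spec_reverse_rule (rule_arr : List String) (out : List String) : Prop := out = reverse_rule_alt rule_arr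
instance (rule_arr : List String) (out : List String) : Decidable (Spec_reverse_rule rule_arr out) := by unfold Spec_reverse_rule; infer_instance

-- ===== CLAIM (what is proved, stated in full; the proofs are below) =====
def Claim_equal_reverse_rule : Prop := ∀ (rule_arr : List String), Dom_reverse_rule rule_arr → Spec_reverse_rule rule_arr (reverse_rule rule_arr)

-- ===== LEMMAS AND PROOFS =====

theorem reverseRuleLoop_eq (xs acc : List String) :
    reverseRuleLoop xs acc = acc ++ xs.takeWhile (fun s => !(s == ">")) := by
  induction xs generalizing acc with
  | nil => simp [reverseRuleLoop]
  | cons c rest ih =>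
    by_cases h : c = ">"
    · simp [reverseRuleLoop, h]
    · simp [reverseRuleLoop, h, ih]

-- the last-'>'-index accumulator of B
def pFold (l : List String) : Int :=
  (PySem.List.enumerate l 0).foldl (fun p ix => if ix.2 = ">" then ix.1 else p) (-1)

theorem pFold_append_singleton (l : List String) (x : String) :
    pFold (l ++ [x]) = if x = ">" then (l.length : Int) else pFold l := by
  simp [pFold, PySem.List.enumerate_append, PySem.List.enumerate_cons,
        PySem.List.enumerate_nil, List.foldl_append]

theorem pFold_main (l : List String) :
    -1 ≤ pFold l ∧ pFold l + 1 ≤ (l.length : Int) ∧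
    (l.drop (pFold l + 1).toNat).reverse = l.reverse.takeWhile (fun s => !(s == ">")) := by
  induction l using List.reverseRecOn with
  | nil => simp [pFold, PySem.List.enumerate_nil]
  | append_singleton l x ih =>
    obtain ⟨h1, h2, h3⟩ := ih
    rw [pFold_append_singleton]
    by_cases hx : x = ">"
    · simp only [hx, if_true]
      refine ⟨by omega, by simp, ?_⟩
      have hd : (l ++ [">"]).drop ((l.length : Int) + 1).toNat = [] := by
        apply List.drop_eq_nil_of_le; simp
      rw [hd]; simp
    · simp only [if_neg hx]
      refine ⟨h1, by simp; omega, ?_⟩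
      have hle : (pFold l + 1).toNat ≤ l.length := by omega
      rw [List.drop_append_of_le_length hle]
      simp [hx, h3]

-- ===== VERDICT (by name: the statement is the Claim_ definition above) =====
theorem reverse_rule_spec : Claim_equal_reverse_rule := by
  intro l _
  show reverse_rule l = reverse_rule_alt l
  obtain ⟨h1, _, h3⟩ := pFold_main l
  simp only [reverse_rule, reverse_rule_alt, reverseRuleLoop_eq, List.nil_append]
  change _ = (PySem.List.slice l (some (pFold l + 1)) none).reverse
  rw [PySem.List.slice_from l (a := pFold l + 1) (by omega), h3]
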